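-- pv_equiv track=rewrite | github.com/lmirabelli/programacion_I_UTN | cuatrimestre I/clase_11/ejercicios.py | ordenar_mayor_menor
-- ===== SOURCE A (Python) =====
-- def ordenar_mayor_menor(lista: list) -> bool:
--     '''Ordena la lista ingresada por parametro de mayor a menor'''
--     validacion_lista_acomodada = False
--
--     for i in range(len(lista) - 1):
--         for j in range(i+1, len(lista)):
--             if lista[i] < lista[j]:
--                 aux = lista[i]
--                 lista[i] = lista[j]
--                 lista[j] = aux
--                 validacion_lista_acomodada = True
--
--     return validacion_lista_acomodada
-- ===== SOURCE B (Python) =====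
-- def ordenar_mayor_menor(lista: list) -> bool:
--     '''Ordena la lista ingresada por parametro de mayor a menor'''
--     desordenada = any(a < b for a, b in zip(lista, lista[1:]))
--     lista.sort(reverse=True)
--     return desordenada
-- ===== Notes on version B (the rewrite author's own statement) =====
-- stated objective: faster
-- what changed: Replaces the quadratic swap double-loop with a single adjacent-pair scan (the flag is true iff the list is not already non-increasing) plus the builtin Timsort for the in-place descending sort.
import Mathlib
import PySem

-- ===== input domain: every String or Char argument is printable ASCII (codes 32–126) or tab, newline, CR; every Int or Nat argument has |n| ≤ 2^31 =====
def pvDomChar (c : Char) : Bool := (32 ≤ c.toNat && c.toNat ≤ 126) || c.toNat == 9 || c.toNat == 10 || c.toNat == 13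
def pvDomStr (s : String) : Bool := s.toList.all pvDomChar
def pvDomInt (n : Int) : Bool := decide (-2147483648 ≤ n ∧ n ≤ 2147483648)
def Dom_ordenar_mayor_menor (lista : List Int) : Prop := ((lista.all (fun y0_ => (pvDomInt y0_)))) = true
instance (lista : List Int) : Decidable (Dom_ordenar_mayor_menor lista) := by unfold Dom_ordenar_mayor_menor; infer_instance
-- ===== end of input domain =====

-- B replaces A's quadratic swap loops by one adjacent-pair scan plus a library sort — faster.
-- Both A and B sort the list in place (same multiset result); the equivalence proved here is about the RETURN value.

-- ===== PORT A =====
-- All indices i, j are in range and nonnegative, so pyGetD/pySetD are exact here.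
def ordenar_mayor_menor (lista : List Int) : Bool :=
  ((PySem.List.pyRange 0 (PySem.List.len lista - 1) 1).foldl (fun st i =>
      (PySem.List.pyRange (i + 1) (PySem.List.len st.1) 1).foldl (fun st j =>
          if PySem.List.pyGetD st.1 i 0 < PySem.List.pyGetD st.1 j 0 then
            let aux := PySem.List.pyGetD st.1 i 0
            (PySem.List.pySetD (PySem.List.pySetD st.1 i (PySem.List.pyGetD st.1 j 0)) j aux, true)
          else st) st) (lista, false)).2

-- ===== PORT B =====
-- any(a < b for a, b in zip(lista, lista[1:])); the in-place sort does not affect the return value.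
def ordenar_mayor_menor_alt (lista : List Int) : Bool :=
  (lista.zip (PySem.List.slice lista (some 1) none)).any (fun p => decide (p.1 < p.2))

-- ===== PRECONDITION & SPEC =====
def Spec_ordenar_mayor_menor (lista : List Int) (out : Bool) : Prop := out = ordenar_mayor_menor_alt lista
instance (lista : List Int) (out : Bool) : Decidable (Spec_ordenar_mayor_menor lista out) := by unfold Spec_ordenar_mayor_menor; infer_instance

-- ===== CLAIM (what is proved, stated in full; the proofs are below) =====
def Claim_equal_ordenar_mayor_menor : Prop := ∀ (lista : List Int), Dom_ordenar_mayor_menor lista → Spec_ordenar_mayor_menor lista (ordenar_mayor_menor lista)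

-- ===== LEMMAS AND PROOFS =====

/-- The flag component of the fold state, once true, stays true. -/
theorem pv_foldl_mono {α : Type} (h : List Int × Bool → α → List Int × Bool)
    (hm : ∀ s a, s.2 = true → (h s a).2 = true) :
    ∀ (l : List α) (s : List Int × Bool), s.2 = true → (l.foldl h s).2 = true := by
  intro l
  induction l with
  | nil => intro s hs; simpa using hs
  | cons a t ih => intro s hs; exact ih _ (hm s a hs)

/-- If the final flag is false, every step was the identity. -/
theorem pv_foldl_fix {α : Type} (h : List Int × Bool → α → List Int × Bool)
    (hm : ∀ s a, s.2 = true → (h s a).2 = true)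
    (hf : ∀ s a, (h s a).2 = false → h s a = s) :
    ∀ (l : List α) (s : List Int × Bool), (l.foldl h s).2 = false →
      l.foldl h s = s ∧ ∀ a ∈ l, h s a = s := by
  intro l
  induction l with
  | nil => intro s _; exact ⟨rfl, by simp⟩
  | cons a t ih =>
    intro s hres
    simp only [List.foldl_cons] at hres ⊢
    have h1 : (h s a).2 = false := by
      cases hfa : (h s a).2
      · rfl
      · have := pv_foldl_mono h hm t (h s a) hfa
        rw [this] at hres; exact absurd hres (by simp)
    have h2 : h s a = s := hf s a h1
    rw [h2] at hres ⊢
    obtain ⟨hfix, hall⟩ := ih s hres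
    refine ⟨hfix, ?_⟩
    intro x hx
    rcases List.mem_cons.mp hx with rfl | hx
    · exact h2
    · exact hall x hx

/-- A fold whose steps are all the identity at `s` returns `s`. -/
theorem pv_foldl_id {α σ : Type} (h : σ → α → σ) (l : List α) (s : σ)
    (hid : ∀ a ∈ l, h s a = s) : l.foldl h s = s := by
  induction l with
  | nil => rfl
  | cons a t ih =>
    rw [List.foldl_cons, hid a (by simp)]
    exact ih (fun x hx => hid x (by simp [hx]))

/-- B's adjacent-pair scan is false exactly on non-increasing lists. -/
theorem pv_alt_false_iff (xs : List Int) :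
    ((xs.zip xs.tail).any (fun p => decide (p.1 < p.2)) = false) ↔ List.IsChain (· ≥ ·) xs := by
  induction xs with
  | nil => simp
  | cons a t ih =>
    cases t with
    | nil => simp
    | cons b t' =>
      simp only [List.tail_cons, List.zip_cons_cons, List.any_cons, Bool.or_eq_false_iff,
        List.isChain_cons_cons] at ih ⊢
      constructor
      · rintro ⟨h1, h2⟩
        refine ⟨?_, ih.mp h2⟩
        simp only [decide_eq_false_iff_not, not_lt] at h1
        exact h1
      · rintro ⟨h1, h2⟩
        refine ⟨?_, ih.mpr h2⟩
        simp only [decide_eq_false_iff_not, not_lt]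
        exact h1

theorem pv_A_false_of_chain (lista : List Int) (hc : List.IsChain (· ≥ ·) lista) :
    ordenar_mayor_menor lista = false := by
  haveI : Trans (α := Int) (β := Int) (γ := Int) (· ≥ ·) (· ≥ ·) (· ≥ ·) := ⟨fun h1 h2 => le_trans h2 h1⟩
  have hp : List.Pairwise (· ≥ ·) lista := by
    rw [List.isChain_iff_pairwise] at hc; exact hc
  have hpg := List.pairwise_iff_getElem.mp hp
  unfold ordenar_mayor_menor
  rw [pv_foldl_id]
  intro i hi
  obtain ⟨hi0, hi1⟩ := (PySem.List.mem_pyRange_one).mp hi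
  rw [pv_foldl_id]
  intro j hj
  obtain ⟨hj0, hj1⟩ := (PySem.List.mem_pyRange_one).mp hj
  simp only [PySem.List.len_eq] at hi1 hj1
  have hiN : 0 ≤ i := hi0
  have hjN : 0 ≤ j := by omega
  have hilen : i < (lista.length : Int) := by omega
  have hjlen : j < (lista.length : Int) := by exact_mod_cast hj1
  have hnc : ¬ PySem.List.pyGetD lista i 0 < PySem.List.pyGetD lista j 0 := by
    rw [PySem.List.pyGetD_eq_getElem lista (i := i) 0 hiN hilen,
        PySem.List.pyGetD_eq_getElem lista (i := j) 0 hjN hjlen]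
    simp only [not_lt]
    exact hpg i.toNat j.toNat (by omega) (by omega) (by omega)
  exact if_neg hnc

theorem pv_chain_of_A_false (lista : List Int) (hA : ordenar_mayor_menor lista = false) :
    List.IsChain (· ≥ ·) lista := by
  rw [List.isChain_iff_getElem]
  intro k hk
  unfold ordenar_mayor_menor at hA
  -- the outer fold left the state unchanged
  have hmonoInner : ∀ (i : Int) (s : List Int × Bool) (j : Int), s.2 = true →
      ((fun (st : List Int × Bool) j =>
          if PySem.List.pyGetD st.1 i 0 < PySem.List.pyGetD st.1 j 0 then
            let aux := PySem.List.pyGetD st.1 i 0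
            (PySem.List.pySetD (PySem.List.pySetD st.1 i (PySem.List.pyGetD st.1 j 0)) j aux, true)
          else st) s j).2 = true := by
    intro i s j hs
    by_cases h : PySem.List.pyGetD s.1 i 0 < PySem.List.pyGetD s.1 j 0
    · simp [h]
    · simp [h, hs]
  have hfixInner : ∀ (i : Int) (s : List Int × Bool) (j : Int),
      ((fun (st : List Int × Bool) j =>
          if PySem.List.pyGetD st.1 i 0 < PySem.List.pyGetD st.1 j 0 then
            let aux := PySem.List.pyGetD st.1 i 0
            (PySem.List.pySetD (PySem.List.pySetD st.1 i (PySem.List.pyGetD st.1 j 0)) j aux, true)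
          else st) s j).2 = false →
      ((fun (st : List Int × Bool) j =>
          if PySem.List.pyGetD st.1 i 0 < PySem.List.pyGetD st.1 j 0 then
            let aux := PySem.List.pyGetD st.1 i 0
            (PySem.List.pySetD (PySem.List.pySetD st.1 i (PySem.List.pyGetD st.1 j 0)) j aux, true)
          else st) s j) = s := by
    intro i s j hfalse
    by_cases h : PySem.List.pyGetD s.1 i 0 < PySem.List.pyGetD s.1 j 0
    · simp [h] at hfalse
    · simp [h]
  obtain ⟨_, houter⟩ := pv_foldl_fix _
    (fun s i hs => pv_foldl_mono _ (hmonoInner i) _ s hs)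
    (fun s i hfalse => (pv_foldl_fix _ (hmonoInner i) (hfixInner i) _ s hfalse).1)
    _ (lista, false) hA
  have hkmem : (k : Int) ∈ PySem.List.pyRange 0 (PySem.List.len lista - 1) 1 := by
    rw [PySem.List.mem_pyRange_one]
    simp only [PySem.List.len_eq]
    omega
  have hinner := houter _ hkmem
  have hinnerFlag : ((PySem.List.pyRange ((k : Int) + 1) (PySem.List.len lista) 1).foldl
      (fun (st : List Int × Bool) j =>
          if PySem.List.pyGetD st.1 (k : Int) 0 < PySem.List.pyGetD st.1 j 0 then
            let aux := PySem.List.pyGetD st.1 (k : Int) 0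
            (PySem.List.pySetD (PySem.List.pySetD st.1 (k : Int) (PySem.List.pyGetD st.1 j 0)) j aux, true)
          else st) (lista, false)).2 = false := by
    rw [hinner]
  obtain ⟨_, hsteps⟩ := pv_foldl_fix _ (hmonoInner (k : Int)) (hfixInner (k : Int))
    _ (lista, false) hinnerFlag
  have hjmem : (k : Int) + 1 ∈ PySem.List.pyRange ((k : Int) + 1) (PySem.List.len lista) 1 := by
    rw [PySem.List.mem_pyRange_one]
    simp only [PySem.List.len_eq]
    omega
  have hstep := hsteps _ hjmem
  by_cases h : PySem.List.pyGetD lista (k : Int) 0 < PySem.List.pyGetD lista ((k : Int) + 1) 0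
  · simp only [h, if_true] at hstep
    have : (true : Bool) = false := congrArg Prod.snd hstep
    exact absurd this (by simp)
  · have hk1 : ((k : Int) + 1) = ((k + 1 : Nat) : Int) := by push_cast; ring
    rw [PySem.List.pyGetD_eq_getElem lista (i := (k : Int)) 0 (by positivity)
          (by exact_mod_cast Nat.lt_of_succ_lt hk),
        hk1, PySem.List.pyGetD_eq_getElem lista (i := ((k + 1 : Nat) : Int)) 0 (by positivity)
          (by exact_mod_cast hk)] at h
    simp only [Int.toNat_natCast, not_lt] at h
    exact h

-- ===== VERDICT (by name: the statement is the Claim_ definition above) =====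
theorem ordenar_mayor_menor_spec : Claim_equal_ordenar_mayor_menor := by
  intro lista _
  unfold Spec_ordenar_mayor_menor ordenar_mayor_menor_alt
  rw [PySem.List.slice_from_one]
  cases hB : (lista.zip lista.tail).any (fun p => decide (p.1 < p.2)) with
  | false => exact pv_A_false_of_chain lista ((pv_alt_false_iff lista).mp hB)
  | true =>
    cases hA : ordenar_mayor_menor lista with
    | true => rfl
    | false =>
      have := (pv_alt_false_iff lista).mpr (pv_chain_of_A_false lista hA)
      rw [hB] at this
      exact absurd this (by simp)
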